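-- pv_equiv track=rewrite | github.com/foutejordan/BA_LR_Explain | count_iterations.py | generate_all_modifications
-- ===== SOURCE A (Python) =====
-- from itertools import combinations
--
-- def generate_all_modifications(binary_vector, n):
--     """
--     Generate all binary vectors with exactly n bits flipped from the input binary vector.
--     """
--     length = len(binary_vector)
--
--     # Generate all combinations of indices to flip
--     indices_to_flip_combinations = combinations(range(length), n)
--
--     # Initialize a list to store all modified vectors
--     modified_vectors = []
--
--     # Iterate through each combination of indices
--     for indices_to_flip in indices_to_flip_combinations:
--         # Create a copy of the original binary vector
--         modified_vector = binary_vector.copy()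
--
--         # Flip the bits at the specified indices
--         for index in indices_to_flip:
--             modified_vector[index] = 1 - modified_vector[index]
--
--         # Append the modified vector to the list
--         modified_vectors.append(modified_vector)
--
--     return modified_vectors
-- ===== SOURCE B (Python) =====
-- def generate_all_modifications(binary_vector, n):
--     """
--     Generate all binary vectors with exactly n bits flipped from the input binary vector.
--
--     Recursive: walks positions left to right carrying a flip budget k, at each
--     position first flipping it (k-1) then keeping it, so vectors are emitted
--     in the same lexicographic order as itertools.combinations.
--     """
--     out = []
--
--     def go(prefix, i, k):
--         if k == 0:
--             out.append(prefix + binary_vector[i:])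
--             return
--         if i == len(binary_vector):
--             return
--         go(prefix + [1 - binary_vector[i]], i + 1, k - 1)
--         go(prefix + [binary_vector[i]], i + 1, k)
--
--     go([], 0, n)
--     return out
-- ===== Notes on version B (the rewrite author's own statement) =====
-- stated objective: alternative
-- what changed: Replaces materializing index combinations and copy-then-flip per combination with a direct recursion over positions carrying a remaining-flip budget, building each output vector once left to right.
import Mathlib
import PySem

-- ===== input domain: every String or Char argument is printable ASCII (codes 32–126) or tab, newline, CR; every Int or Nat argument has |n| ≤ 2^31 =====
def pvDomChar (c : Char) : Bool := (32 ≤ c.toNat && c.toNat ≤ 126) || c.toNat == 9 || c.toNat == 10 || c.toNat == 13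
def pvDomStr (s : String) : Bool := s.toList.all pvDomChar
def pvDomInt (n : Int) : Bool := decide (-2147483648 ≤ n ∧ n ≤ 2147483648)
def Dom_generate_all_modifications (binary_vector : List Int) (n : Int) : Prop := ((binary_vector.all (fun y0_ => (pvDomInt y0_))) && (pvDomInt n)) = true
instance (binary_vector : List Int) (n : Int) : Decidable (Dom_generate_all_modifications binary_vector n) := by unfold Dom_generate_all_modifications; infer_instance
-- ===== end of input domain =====

-- B replaces materializing index combinations then copy-and-flip with a direct
-- recursion over positions carrying a remaining-flip budget (alternative decomposition).


-- ===== PORT A =====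
-- itertools.combinations(xs, k) in lexicographic order
def pvCombs (k : Nat) (xs : List Nat) : List (List Nat) :=
  match k, xs with
  | 0, _ => [[]]
  | _ + 1, [] => []
  | k + 1, x :: t => (pvCombs k t).map (fun c => x :: c) ++ pvCombs (k + 1) t

-- modified_vector[index] = 1 - modified_vector[index]; every index comes from
-- range(length) so it is in range and List.set/getD is exact here
def pvFlip (v : List Int) (i : Nat) : List Int := v.set i (1 - v.getD i 0)

def generate_all_modifications (binary_vector : List Int) (n : Int) : List (List Int) :=
  (pvCombs n.toNat (List.range binary_vector.length)).map
    (fun idxs => idxs.foldl pvFlip binary_vector)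

-- ===== PORT B =====
def pvGo (pre rest : List Int) (k : Int) : List (List Int) :=
  if k = 0 then [pre ++ rest]
  else match rest with
    | [] => []
    | b :: t => pvGo (pre ++ [1 - b]) t (k - 1) ++ pvGo (pre ++ [b]) t k
termination_by rest.length

def generate_all_modifications_alt (binary_vector : List Int) (n : Int) : List (List Int) :=
  pvGo [] binary_vector n

-- ===== PRECONDITION & SPEC =====
-- A raises ValueError for n < 0 (itertools.combinations rejects negative r)
def Pre_generate_all_modifications (binary_vector : List Int) (n : Int) : Prop := 0 ≤ n
instance (binary_vector : List Int) (n : Int) : Decidable (Pre_generate_all_modifications binary_vector n) := by unfold Pre_generate_all_modifications; infer_instance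
def pvWitness_generate_all_modifications : List Int × Int := ([1, 0, 1], 1)

def Spec_generate_all_modifications (binary_vector : List Int) (n : Int) (out : List (List Int)) : Prop := out = generate_all_modifications_alt binary_vector n
instance (binary_vector : List Int) (n : Int) (out : List (List Int)) : Decidable (Spec_generate_all_modifications binary_vector n out) := by unfold Spec_generate_all_modifications; infer_instance

-- ===== CLAIM (what is proved, stated in full; the proofs are below) =====
def Claim_equal_generate_all_modifications : Prop := ∀ (binary_vector : List Int) (n : Int), Dom_generate_all_modifications binary_vector n → Pre_generate_all_modifications binary_vector n → Spec_generate_all_modifications binary_vector n (generate_all_modifications binary_vector n)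

-- ===== LEMMAS AND PROOFS =====

lemma pvFlip_append (pre : List Int) (b : Int) (t : List Int) :
    pvFlip (pre ++ b :: t) pre.length = pre ++ (1 - b) :: t := by
  simp [pvFlip, List.getD, List.set_append_right]

lemma pvGo_eq (rest : List Int) : ∀ (k : Nat) (pre : List Int),
    pvGo pre rest (k : Int) =
      (pvCombs k ((List.range rest.length).map (· + pre.length))).map
        (fun idxs => idxs.foldl pvFlip (pre ++ rest)) := by
  induction rest with
  | nil =>
    intro k pre
    cases k with
    | zero => simp [pvGo, pvCombs]
    | succ k => simp [pvGo, pvCombs]; omega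
  | cons b t ih =>
    intro k pre
    cases k with
    | zero => simp [pvGo, pvCombs]
    | succ k =>
      rw [pvGo]
      have hk : ((k + 1 : Nat) : Int) ≠ 0 := by omega
      simp only [hk, if_false]
      have hk1 : ((k + 1 : Nat) : Int) - 1 = (k : Int) := by omega
      rw [hk1, ih k (pre ++ [1 - b]), ih (k + 1) (pre ++ [b])]
      have hrange : (List.range (b :: t).length).map (· + pre.length)
          = pre.length :: (List.range t.length).map (· + (pre.length + 1)) := by
        rw [List.length_cons, List.range_succ_eq_map, List.map_cons, List.map_map]
        congr 1
        · omega
        · exact List.map_congr_left (fun x _ => by simp only [Function.comp_apply]; omega)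
      rw [hrange, pvCombs, List.map_append, List.map_map]
      congr 1
      · simp only [List.length_append, List.length_cons, List.length_nil, Nat.zero_add]
        apply List.map_congr_left
        intro idxs _
        simp only [Function.comp_apply, List.foldl_cons, pvFlip_append]
        congr 1
        simp
      · simp only [List.length_append, List.length_cons, List.length_nil, Nat.zero_add]
        apply List.map_congr_left
        intro idxs _
        congr 1
        simp

-- ===== VERDICT (by name: the statement is the Claim_ definition above) =====
theorem generate_all_modifications_spec : Claim_equal_generate_all_modifications := by
  intro bv n _ hpre
  unfold Spec_generate_all_modifications generate_all_modifications generate_all_modifications_alt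
  have hn : ((n.toNat : Nat) : Int) = n := Int.toNat_of_nonneg hpre
  have h := pvGo_eq bv n.toNat []
  rw [hn] at h
  rw [h]
  simp
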